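-- pv_equiv track=rewrite | github.com/thealper2/tensortonic-solutions | easy/differencing.py | differencing
-- ===== SOURCE A (Python) =====
-- def differencing(series, order):
--     """
--     Apply d-th order differencing to the time series.
--     """
--     for _ in range(order):
--         new_series = []
--         n = len(series)
--         for i in range(n - 1):
--             new_series.append(series[i + 1] - series[i])
--
--         series = new_series
--
--     return series
-- ===== SOURCE B (Python) =====
-- def differencing(series, order):
--     """
--     Apply d-th order differencing via one binomial-kernel convolution pass.
--     """
--     if order <= 0:
--         return list(series)
--     if order >= len(series):
--         return []
--     # Pascal row: C(order, k) for k = 0..order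
--     row = [1]
--     for _ in range(order):
--         row = [1] + [row[j] + row[j + 1] for j in range(len(row) - 1)] + [1]
--     n = len(series)
--     return [
--         sum((-1) ** k * row[k] * series[i + order - k] for k in range(order + 1))
--         for i in range(n - order)
--     ]
-- ===== Notes on version B (the rewrite author's own statement) =====
-- stated objective: alternative
-- what changed: Replaces the order repeated O(n) difference sweeps (rebuilding an intermediate series each pass) with a single convolution pass using precomputed signed binomial coefficients: result[i] = sum_k (-1)^k C(order,k) * series[i+order-k].
import Mathlib
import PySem

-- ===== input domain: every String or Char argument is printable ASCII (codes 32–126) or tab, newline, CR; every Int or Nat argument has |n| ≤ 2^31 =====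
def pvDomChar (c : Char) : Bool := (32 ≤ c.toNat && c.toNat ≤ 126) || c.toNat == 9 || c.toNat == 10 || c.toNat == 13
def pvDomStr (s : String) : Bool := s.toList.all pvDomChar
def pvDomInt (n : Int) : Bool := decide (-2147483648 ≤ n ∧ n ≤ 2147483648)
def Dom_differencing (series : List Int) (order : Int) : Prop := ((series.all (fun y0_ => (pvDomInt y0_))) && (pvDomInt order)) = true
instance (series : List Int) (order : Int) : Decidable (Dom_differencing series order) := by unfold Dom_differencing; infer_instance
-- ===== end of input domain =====

-- B replaces A's repeated difference sweeps by a single binomial-kernel convolution pass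
-- (alternative decomposition; no speed claim).

-- ===== PORT A =====
-- A: repeat `order` times: rebuild the series as adjacent differences.
-- indices i and i+1 are always in range (i < n-1), so pyGetD's default is never used.
def differencing (series : List Int) (order : Int) : List Int :=
  (PySem.List.pyRange 0 order 1).foldl
    (fun s _ =>
      (PySem.List.pyRange 0 ((s.length : Int) - 1) 1).foldl
        (fun acc i => acc ++ [PySem.List.pyGetD s (i + 1) 0 - PySem.List.pyGetD s i 0]) [])
    series

-- ===== PORT B =====
-- B: build the Pascal row C(order, ·), then one convolution pass.
-- all indices (row j, row (j+1), row k, series (i+order-k)) are in range, so pyGetD's default is never used.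
def differencing_alt (series : List Int) (order : Int) : List Int :=
  if order ≤ 0 then series
  else if (series.length : Int) ≤ order then []
  else
    let row := (PySem.List.pyRange 0 order 1).foldl
      (fun r _ =>
        [1] ++ (PySem.List.pyRange 0 ((r.length : Int) - 1) 1).map
            (fun j => PySem.List.pyGetD r j 0 + PySem.List.pyGetD r (j + 1) 0) ++ [1])
      [1]
    (PySem.List.pyRange 0 ((series.length : Int) - order) 1).map (fun i =>
      (PySem.List.pyRange 0 (order + 1) 1).foldl
        (fun acc k =>
          acc + (-1) ^ k.toNat * PySem.List.pyGetD row k 0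
              * PySem.List.pyGetD series (i + order - k) 0)
        0)

-- ===== PRECONDITION & SPEC =====
def Spec_differencing (series : List Int) (order : Int) (out : List Int) : Prop := out = differencing_alt series order
instance (series : List Int) (order : Int) (out : List Int) : Decidable (Spec_differencing series order out) := by unfold Spec_differencing; infer_instance

-- ===== CLAIM (what is proved, stated in full; the proofs are below) =====
def Claim_equal_differencing : Prop := ∀ (series : List Int) (order : Int), Dom_differencing series order → Spec_differencing series order (differencing series order)

-- ===== LEMMAS AND PROOFS =====

-- one difference sweep, in clean form
def diffC (s : List Int) : List Int :=
  (List.range (s.length - 1)).map (fun i => s.getD (i + 1) 0 - s.getD i 0)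

-- the signed binomial convolution, in clean form
def kern (d : Nat) (s : List Int) (i : Nat) : Int :=
  ∑ k ∈ Finset.range (d + 1), (-1 : Int) ^ k * (d.choose k : Int) * s.getD (i + (d - k)) 0

def convC (d : Nat) (s : List Int) : List Int :=
  (List.range (s.length - d)).map (kern d s)

-- Pascal row, clean form
def rowC (d : Nat) : List Int := (List.range (d + 1)).map (fun k => (d.choose k : Int))

theorem foldl_const_iterate {α β : Type} (l : List β) (g : α → α) (s : α) :
    l.foldl (fun s _ => g s) s = g^[l.length] s := by
  induction l generalizing s with
  | nil => rfl
  | cons x t ih => simp [List.foldl_cons, ih, Function.iterate_succ_apply]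

theorem sum_map_range (n : Nat) (f : Nat → Int) :
    ((List.range n).map f).sum = ∑ k ∈ Finset.range n, f k := by
  induction n with
  | zero => rfl
  | succ m ih => simp [List.range_succ, Finset.sum_range_succ, ih]

theorem length_diffC (s : List Int) : (diffC s).length = s.length - 1 := by
  simp [diffC]

theorem getD_diffC (s : List Int) (j : Nat) (h : j < s.length - 1) :
    (diffC s).getD j 0 = s.getD (j + 1) 0 - s.getD j 0 := by
  have hj : j < (diffC s).length := by rw [length_diffC]; exact h
  rw [List.getD_eq_getElem _ _ hj]
  simp [diffC]

theorem getD_rowC (d k : Nat) (h : k < d + 1) :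
    (rowC d).getD k 0 = (d.choose k : Int) := by
  have hk : k < (rowC d).length := by simp [rowC]; omega
  rw [List.getD_eq_getElem _ _ hk]
  simp [rowC]

theorem map_getD_range (s : List Int) : (List.range s.length).map (fun i => s.getD i 0) = s := by
  apply List.ext_getElem
  · simp
  · intro n h1 h2
    simp only [List.getElem_map, List.getElem_range]
    exact List.getD_eq_getElem s 0 h2

-- A's inner loop is diffC
theorem innerA_eq_diffC (s : List Int) :
    (PySem.List.pyRange 0 ((s.length : Int) - 1) 1).foldl
      (fun acc i => acc ++ [PySem.List.pyGetD s (i + 1) 0 - PySem.List.pyGetD s i 0]) []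
      = diffC s := by
  rw [PySem.List.foldl_append_singleton_eq_map, PySem.List.pyRange_one]
  simp only [List.nil_append, List.map_map, diffC]
  apply List.ext_getElem
  · simp
  · intro n h1 h2
    simp only [List.getElem_map, List.getElem_range, Function.comp_apply]
    have e1 : (0 : Int) + (n : Int) + 1 = ((n + 1 : Nat) : Int) := by omega
    have e2 : (0 : Int) + (n : Int) = ((n : Nat) : Int) := by omega
    rw [e1, e2, PySem.List.pyGetD_natCast, PySem.List.pyGetD_natCast]

-- A iterates diffC
theorem differencing_eq_iterate (s : List Int) (order : Int) :
    differencing s order = diffC^[order.toNat] s := by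
  unfold differencing
  have hg : (fun (s : List Int) (_ : Int) =>
      (PySem.List.pyRange 0 ((s.length : Int) - 1) 1).foldl
        (fun acc i => acc ++ [PySem.List.pyGetD s (i + 1) 0 - PySem.List.pyGetD s i 0]) [])
      = fun (s : List Int) (_ : Int) => diffC s := by
    funext s i; exact innerA_eq_diffC s
  rw [hg, foldl_const_iterate, PySem.List.length_pyRange_one]
  norm_num

-- Pascal step
theorem length_rowC (d : Nat) : (rowC d).length = d + 1 := by simp [rowC]

theorem pascal_step (d : Nat) :
    [1] ++ (PySem.List.pyRange 0 (((rowC d).length : Int) - 1) 1).map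
        (fun j => PySem.List.pyGetD (rowC d) j 0 + PySem.List.pyGetD (rowC d) (j + 1) 0) ++ [1]
      = rowC (d + 1) := by
  rw [length_rowC]
  rw [show (((d + 1 : Nat) : Int) - 1) = ((d : Nat) : Int) by omega]
  rw [PySem.List.pyRange_one]
  rw [show (((d : Nat) : Int) - 0).toNat = d by omega]
  rw [List.map_map]
  have hmap : (List.range d).map
      ((fun j => PySem.List.pyGetD (rowC d) j 0 + PySem.List.pyGetD (rowC d) (j + 1) 0)
        ∘ fun k => (0 : Int) + (k : Nat))
      = (List.range d).map (fun k => ((d + 1).choose (k + 1) : Int)) := by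
    apply List.map_congr_left
    intro k hk
    have hkd : k < d := List.mem_range.mp hk
    simp only [Function.comp_apply]
    have e2 : (0 : Int) + (k : Int) = ((k : Nat) : Int) := by omega
    have e1 : (0 : Int) + (k : Int) + 1 = ((k + 1 : Nat) : Int) := by omega
    rw [e1, e2, PySem.List.pyGetD_natCast, PySem.List.pyGetD_natCast,
        getD_rowC d k (by omega), getD_rowC d (k + 1) (by omega)]
    rw [Nat.choose_succ_succ d k]
    push_cast
    ring
  rw [hmap]
  have : rowC (d + 1)
      = (1 : Int) :: ((List.range (d + 1)).map (fun k => ((d + 1).choose (k + 1) : Int))) := by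
    unfold rowC
    rw [List.range_succ_eq_map, List.map_cons, List.map_map]
    simp [Function.comp_def]
  rw [this, List.range_succ, List.map_append]
  simp

theorem pascal_iter (n : Nat) :
    (fun (r : List Int) =>
        [1] ++ (PySem.List.pyRange 0 ((r.length : Int) - 1) 1).map
            (fun j => PySem.List.pyGetD r j 0 + PySem.List.pyGetD r (j + 1) 0) ++ [1])^[n] [1]
      = rowC n := by
  induction n with
  | zero => simp [rowC]
  | succ m ih => rw [Function.iterate_succ_apply', ih, pascal_step]

theorem row_eq_rowC (order : Int) :
    (PySem.List.pyRange 0 order 1).foldl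
      (fun r _ =>
        [1] ++ (PySem.List.pyRange 0 ((r.length : Int) - 1) 1).map
            (fun j => PySem.List.pyGetD r j 0 + PySem.List.pyGetD r (j + 1) 0) ++ [1])
      [1] = rowC order.toNat := by
  rw [foldl_const_iterate, PySem.List.length_pyRange_one,
      show (order - 0).toNat = order.toNat by omega, pascal_iter]

-- the key combinatorial step
theorem kern_step (d : Nat) (s : List Int) (i : Nat) (hi : i < s.length - (d + 1)) :
    kern d (diffC s) i = kern (d + 1) s i := by
  unfold kern
  have step1 : ∑ k ∈ Finset.range (d + 1),
      (-1 : Int) ^ k * (d.choose k : Int) * (diffC s).getD (i + (d - k)) 0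
      = ∑ k ∈ Finset.range (d + 1),
        ((-1 : Int) ^ k * (d.choose k : Int) * s.getD (i + (d - k + 1)) 0
          - (-1 : Int) ^ k * (d.choose k : Int) * s.getD (i + (d - k)) 0) := by
    apply Finset.sum_congr rfl
    intro k hk
    have hkd : k < d + 1 := Finset.mem_range.mp hk
    rw [getD_diffC s (i + (d - k)) (by omega),
        show i + (d - k) + 1 = i + (d - k + 1) by omega]
    ring
  rw [step1, Finset.sum_sub_distrib]
  have hS : ∑ k ∈ Finset.range (d + 2), (-1 : Int) ^ k * (d.choose k : Int) * s.getD (i + (d + 1 - k)) 0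
      = ∑ k ∈ Finset.range (d + 1), (-1 : Int) ^ k * (d.choose k : Int) * s.getD (i + (d - k + 1)) 0 := by
    rw [Finset.sum_range_succ, Nat.choose_succ_self]
    simp only [Nat.cast_zero, mul_zero, zero_mul, add_zero]
    apply Finset.sum_congr rfl
    intro k hk
    have hkd : k < d + 1 := Finset.mem_range.mp hk
    rw [show d + 1 - k = d - k + 1 by omega]
  have hS' : ∑ k ∈ Finset.range (d + 2), (-1 : Int) ^ k * (d.choose k : Int) * s.getD (i + (d + 1 - k)) 0
      = (∑ j ∈ Finset.range (d + 1), (-1 : Int) ^ (j + 1) * (d.choose (j + 1) : Int) * s.getD (i + (d - j)) 0)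
        + s.getD (i + (d + 1)) 0 := by
    rw [Finset.sum_range_succ']
    simp only [pow_zero, Nat.choose_zero_right, Nat.cast_one, one_mul, Nat.sub_zero]
    congr 1
    apply Finset.sum_congr rfl
    intro j hj
    rw [show d + 1 - (j + 1) = d - j by omega]
  have hrhs : ∀ j ∈ Finset.range (d + 1),
      (-1 : Int) ^ (j + 1) * (((d + 1).choose (j + 1) : Nat) : Int) * s.getD (i + (d + 1 - (j + 1))) 0
      = (-1 : Int) ^ (j + 1) * (d.choose (j + 1) : Int) * s.getD (i + (d - j)) 0
        - (-1 : Int) ^ j * (d.choose j : Int) * s.getD (i + (d - j)) 0 := by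
    intro j hj
    rw [show d + 1 - (j + 1) = d - j by omega, Nat.choose_succ_succ]
    push_cast
    ring
  have key : ∑ k ∈ Finset.range (d + 1 + 1), (-1 : Int) ^ k * (((d + 1).choose k : Nat) : Int) * s.getD (i + (d + 1 - k)) 0
      = ((∑ j ∈ Finset.range (d + 1), (-1 : Int) ^ (j + 1) * (d.choose (j + 1) : Int) * s.getD (i + (d - j)) 0)
          + s.getD (i + (d + 1)) 0)
        - ∑ j ∈ Finset.range (d + 1), (-1 : Int) ^ j * (d.choose j : Int) * s.getD (i + (d - j)) 0 := by
    rw [Finset.sum_range_succ']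
    simp only [pow_zero, Nat.choose_zero_right, Nat.cast_one, one_mul, Nat.sub_zero]
    rw [Finset.sum_congr rfl hrhs, Finset.sum_sub_distrib]
    ring
  rw [key, ← hS', hS]
theorem conv_step (d : Nat) (s : List Int) : convC d (diffC s) = convC (d + 1) s := by
  unfold convC
  rw [length_diffC, show s.length - 1 - d = s.length - (d + 1) by omega]
  apply List.map_congr_left
  intro i hi
  exact kern_step d s i (List.mem_range.mp hi)

theorem iterate_eq_conv (d : Nat) (s : List Int) : diffC^[d] s = convC d s := by
  induction d generalizing s with
  | zero =>
    have hk : ∀ i, kern 0 s i = s.getD i 0 := by intro i; simp [kern]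
    rw [Function.iterate_zero_apply]
    unfold convC
    simp only [Nat.sub_zero]
    rw [List.map_congr_left (fun i _ => hk i), map_getD_range]
  | succ m ih =>
    rw [Function.iterate_succ_apply, ih, conv_step]

-- B equals convC for positive order
theorem alt_eq_conv (s : List Int) (order : Int) (h : 0 < order) (h2 : order < (s.length : Int)) :
    differencing_alt s order = convC order.toNat s := by
  unfold differencing_alt
  rw [if_neg (by omega), if_neg (by omega), row_eq_rowC]
  simp only [PySem.List.pyRange_one, List.map_map]
  rw [show (((s.length : Int) - order) - 0).toNat = s.length - order.toNat by omega,
      show ((order + 1) - 0).toNat = order.toNat + 1 by omega]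
  unfold convC
  apply List.map_congr_left
  intro i hi
  have hil : i < s.length - order.toNat := List.mem_range.mp hi
  simp only [Function.comp_apply]
  rw [PySem.List.foldl_add, zero_add, List.map_map, sum_map_range]
  unfold kern
  apply Finset.sum_congr rfl
  intro k hk
  have hkd : k < order.toNat + 1 := Finset.mem_range.mp hk
  simp only [Function.comp_apply]
  rw [show ((0 : Int) + (k : Nat)).toNat = k by omega]
  rw [show ((0 : Int) + (k : Nat)) = ((k : Nat) : Int) by omega]
  rw [PySem.List.pyGetD_natCast, getD_rowC order.toNat k hkd]
  rw [show (0 : Int) + (i : Nat) + order - ((k : Nat) : Int) = ((i + (order.toNat - k) : Nat) : Int) by omega]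
  rw [PySem.List.pyGetD_natCast]

-- ===== VERDICT (by name: the statement is the Claim_ definition above) =====
theorem differencing_spec : Claim_equal_differencing := by
  intro series order _
  unfold Spec_differencing
  by_cases h : order ≤ 0
  · have h0 : order.toNat = 0 := by omega
    rw [differencing_eq_iterate, h0]
    simp [differencing_alt, h]
  · by_cases h2 : (series.length : Int) ≤ order
    · rw [differencing_eq_iterate, iterate_eq_conv]
      unfold differencing_alt
      rw [if_neg h, if_pos h2]
      unfold convC
      rw [show series.length - order.toNat = 0 by omega]
      simp
    · rw [differencing_eq_iterate, iterate_eq_conv,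
          alt_eq_conv series order (by omega) (by omega)]
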